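-- pv_equiv track=rewrite | github.com/Ilyin-Ilya/DiophantineEquations | main.py | calculate_population_inaccuracy
-- ===== SOURCE A (Python) =====
-- from typing import Tuple, List
--
-- class foundAnswer(Exception):
--     """Raised when the input value is too small"""
--     pass
--
-- def calculate_inaccuracy(equation: Tuple[List[int], int], population_member: List[int]) -> int:
--     equation_sum = 0
--     for i in range(len(equation[0])):
--         equation_sum += equation[0][i] * population_member[i]
--     res = abs(equation_sum - equation[1])
--     if res == 0:
--         raise foundAnswer("Found answer")
--     return res
--
-- def calculate_population_inaccuracy(equation: Tuple[List[int], int], population: List[List[int]]) -> List[int]: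
--     population_inaccuracy = []
--     for i in population:
--         try:
--             population_inaccuracy.append(calculate_inaccuracy(equation, i))
--         except foundAnswer:
--             raise foundAnswer(i)
--     return population_inaccuracy
-- ===== SOURCE B (Python) =====
-- class foundAnswer(Exception):
--     """Raised when the input value is too small"""
--     pass
--
--
-- def calculate_population_inaccuracy(equation, population):
--     # Column-major accumulation: iterate over coefficient positions, updating
--     # one running sum per population member, instead of a per-member dot product.
--     coeffs, target = equation
--     sums = [0] * len(population)
--     for j in range(len(coeffs)):
--         c = coeffs[j]
--         sums = [s + c * member[j] for s, member in zip(sums, population)]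
--     inaccuracies = [abs(s - target) for s in sums]
--     for member, r in zip(population, inaccuracies):
--         if r == 0:
--             raise foundAnswer(member)
--     return inaccuracies
-- ===== Notes on version B (the rewrite author's own statement) =====
-- stated objective: alternative
-- what changed: Transposes the traversal: instead of A's per-member dot product with try/except early exit, B sweeps column-by-column over coefficient positions, updating a vector of one running sum per member, then derives the inaccuracies and scans once for an exact solution.
import Mathlib
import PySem

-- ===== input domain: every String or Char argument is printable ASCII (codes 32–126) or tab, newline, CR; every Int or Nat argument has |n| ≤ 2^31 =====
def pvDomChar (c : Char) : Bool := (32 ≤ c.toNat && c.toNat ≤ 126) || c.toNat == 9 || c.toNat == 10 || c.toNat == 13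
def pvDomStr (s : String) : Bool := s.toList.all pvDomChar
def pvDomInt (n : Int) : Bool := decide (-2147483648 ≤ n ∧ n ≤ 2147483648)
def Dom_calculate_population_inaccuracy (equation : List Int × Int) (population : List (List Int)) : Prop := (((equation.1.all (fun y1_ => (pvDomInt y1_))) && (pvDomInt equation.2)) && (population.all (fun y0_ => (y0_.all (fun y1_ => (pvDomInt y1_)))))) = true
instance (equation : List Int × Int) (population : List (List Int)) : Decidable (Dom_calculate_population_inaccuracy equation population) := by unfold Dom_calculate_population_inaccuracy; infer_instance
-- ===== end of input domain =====

-- B transposes the traversal: a column-by-column sweep over coefficient positions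
-- updating one running sum per member, instead of A's per-member dot product with
-- try/except early exit; objective: alternative (same asymptotic cost).
-- Equivalence is over the return value on inputs where A returns (Pre_ below).

-- ===== PORT A =====
-- helper calculate_inaccuracy inlined: indexed dot product over range(len(equation[0])).
-- A's 'raise foundAnswer' (res == 0) and the IndexError on short members are excluded
-- by Pre_; the pyGetD default 0 is unreachable under Pre_.
def calculate_population_inaccuracy (equation : List Int × Int) (population : List (List Int)) : List Int :=
  population.foldl (fun acc m =>
    let s := (PySem.List.pyRange 0 (equation.1.length : Int) 1).foldl
      (fun es i => es + PySem.List.pyGetD equation.1 i 0 * PySem.List.pyGetD m i 0) 0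
    acc ++ [|s - equation.2|]) []

-- ===== PORT B =====
-- Source B: sums = [0]*len(population); for j in range(len(coeffs)): sums = [s + coeffs[j]*member[j]
-- for s, member in zip(sums, population)]; then inaccuracies = [abs(s-target)] and the zero
-- scan (which under Pre_ finds no zero, so the port returns the list).
def calculate_population_inaccuracy_alt (equation : List Int × Int) (population : List (List Int)) : List Int :=
  let sums := (PySem.List.pyRange 0 (equation.1.length : Int) 1).foldl
    (fun sums j =>
      let c := PySem.List.pyGetD equation.1 j 0
      (sums.zip population).map (fun p => p.1 + c * PySem.List.pyGetD p.2 j 0))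
    (population.map (fun _ => (0 : Int)))
  sums.map (fun s => |s - equation.2|)

-- ===== PRECONDITION & SPEC =====
-- Pre_ excludes exactly the inputs where Python A raises: a member shorter than the
-- coefficient list (IndexError) or a member solving the equation exactly (foundAnswer).
def Pre_calculate_population_inaccuracy (equation : List Int × Int) (population : List (List Int)) : Prop :=
  ∀ m ∈ population, equation.1.length ≤ m.length ∧
    (equation.1.zip m).foldl (fun s p => s + p.1 * p.2) 0 ≠ equation.2
instance (equation : List Int × Int) (population : List (List Int)) : Decidable (Pre_calculate_population_inaccuracy equation population) := by unfold Pre_calculate_population_inaccuracy; infer_instance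

def pvWitness_calculate_population_inaccuracy : (List Int × Int) × List (List Int) :=
  (([1, 2], 5), [[1, 1], [2, 2]])

def Spec_calculate_population_inaccuracy (equation : List Int × Int) (population : List (List Int)) (out : List Int) : Prop := out = calculate_population_inaccuracy_alt equation population
instance (equation : List Int × Int) (population : List (List Int)) (out : List Int) : Decidable (Spec_calculate_population_inaccuracy equation population out) := by unfold Spec_calculate_population_inaccuracy; infer_instance

-- ===== CLAIM (what is proved, stated in full; the proofs are below) =====
def Claim_equal_calculate_population_inaccuracy : Prop := ∀ (equation : List Int × Int) (population : List (List Int)), Dom_calculate_population_inaccuracy equation population → Pre_calculate_population_inaccuracy equation population → Spec_calculate_population_inaccuracy equation population (calculate_population_inaccuracy equation population)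

-- ===== LEMMAS AND PROOFS =====

-- zip of a mapped list with the list itself, pointwise.
theorem zip_map_self' {α β : Type} (l : List α) (f : α → β) :
    (l.map f).zip l = l.map (fun m => (f m, m)) := by
  induction l with
  | nil => rfl
  | cons a t ih => simp only [List.map_cons, List.zip_cons_cons, ih]

-- Exchange of fold order: the column-major sweep over any index list js equals, member
-- by member, the row-major accumulation of the same terms.
theorem col_fold_eq_row_fold (coeffs : List Int) (population : List (List Int))
    (js : List Int) (f : List Int → Int) :
    js.foldl (fun sums j =>
        (sums.zip population).map
          (fun p => p.1 + PySem.List.pyGetD coeffs j 0 * PySem.List.pyGetD p.2 j 0))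
      (population.map f)
    = population.map (fun m =>
        js.foldl (fun s j => s + PySem.List.pyGetD coeffs j 0 * PySem.List.pyGetD m j 0) (f m)) := by
  induction js generalizing f with
  | nil => simp
  | cons j js ih =>
    simp only [List.foldl_cons]
    have hz : (population.map f).zip population = population.map (fun m => (f m, m)) :=
      zip_map_self' population f
    rw [hz, List.map_map]
    exact ih (fun m => f m + PySem.List.pyGetD coeffs j 0 * PySem.List.pyGetD m j 0)

-- ===== VERDICT (by name: the statement is the Claim_ definition above) =====
theorem calculate_population_inaccuracy_spec : Claim_equal_calculate_population_inaccuracy := by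
  intro equation population _ _
  unfold Spec_calculate_population_inaccuracy
  unfold calculate_population_inaccuracy calculate_population_inaccuracy_alt
  rw [PySem.List.foldl_append_singleton_eq_map]
  simp only [List.nil_append]
  rw [col_fold_eq_row_fold equation.1 population
        (PySem.List.pyRange 0 (equation.1.length : Int) 1) (fun _ => 0), List.map_map]
  rfl
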